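-- pv_equiv track=rewrite | github.com/zeljkostjepanovic/python-excercises | Udemy/build-10-apps/password_checker/main.py | has_digits
-- ===== SOURCE A (Python) =====
-- def has_digits(a):
--     results = []
--     for char in a:
--         if char.isdigit():
--             results.append("digit")
--         else:
--             results.append("nodigit")
--     if all([x in results for x in ["digit","nodigit"] ]):
--         return "Pass"
--     else:
--         return "Fail"
-- ===== SOURCE B (Python) =====
-- def has_digits(a):
--     d = sum(1 for c in a if c.isdigit())
--     return "Pass" if 0 < d < len(a) else "Fail"
-- ===== Notes on version B (the rewrite author's own statement) =====
-- stated objective: simpler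
-- what changed: Replaces the per-character label list plus two membership scans with a single integer digit count decided by the arithmetic test 0 < d < len(a).
import Mathlib
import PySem

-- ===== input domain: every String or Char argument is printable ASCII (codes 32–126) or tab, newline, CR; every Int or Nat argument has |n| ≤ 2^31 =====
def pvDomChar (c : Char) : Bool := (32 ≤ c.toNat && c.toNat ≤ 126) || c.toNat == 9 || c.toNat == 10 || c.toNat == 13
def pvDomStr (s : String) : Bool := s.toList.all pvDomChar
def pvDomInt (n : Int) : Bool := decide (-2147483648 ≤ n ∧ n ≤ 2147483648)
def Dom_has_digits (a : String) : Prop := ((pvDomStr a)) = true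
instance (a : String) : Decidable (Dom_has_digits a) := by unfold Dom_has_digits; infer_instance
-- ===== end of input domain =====

-- B replaces A's per-character label list plus two membership tests
-- with one integer digit count and the arithmetic test 0 < d < len(a) (simpler).

-- ===== PORT A =====
def has_digits (a : String) : String :=
  let results : List String :=
    (a.toList.foldl (fun r char =>
      if PySem.Chars.isdigit char then "digit" :: r else "nodigit" :: r) []).reverse
  if (["digit", "nodigit"].map (fun x => decide (x ∈ results))).all id then
    "Pass"
  else
    "Fail"

-- ===== PORT B =====
def has_digits_alt (a : String) : String :=
  let d : Int := a.toList.foldl (fun acc c => if PySem.Chars.isdigit c then acc + 1 else acc) 0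
  if 0 < d ∧ d < PySem.Str.len a then "Pass" else "Fail"

-- ===== PRECONDITION & SPEC =====
def Spec_has_digits (a : String) (out : String) : Prop := out = has_digits_alt a
instance (a : String) (out : String) : Decidable (Spec_has_digits a out) := by unfold Spec_has_digits; infer_instance

-- ===== CLAIM (what is proved, stated in full; the proofs are below) =====
def Claim_equal_has_digits : Prop := ∀ (a : String), Dom_has_digits a → Spec_has_digits a (has_digits a)

-- ===== LEMMAS AND PROOFS =====

theorem labels_foldl (l : List Char) (r0 : List String) :
    (l.foldl (fun r char =>
      if PySem.Chars.isdigit char then "digit" :: r else "nodigit" :: r) r0).reverse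
    = r0.reverse ++ l.map (fun c => if PySem.Chars.isdigit c then "digit" else "nodigit") := by
  induction l generalizing r0 with
  | nil => simp
  | cons c t ih => simp only [List.foldl_cons]; split_ifs with h <;> simp [ih, h]

theorem count_foldl (l : List Char) (z : Int) :
    l.foldl (fun acc c => if PySem.Chars.isdigit c then acc + 1 else acc) z
    = z + l.countP PySem.Chars.isdigit := by
  induction l generalizing z with
  | nil => simp
  | cons c t ih =>
    simp only [List.foldl_cons, List.countP_cons, ih]
    split_ifs with h <;> simp <;> ring

theorem digit_mem (l : List Char) :
    ("digit" ∈ l.map (fun c => if PySem.Chars.isdigit c then "digit" else "nodigit"))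
    ↔ 0 < l.countP PySem.Chars.isdigit := by
  rw [List.countP_pos_iff]
  simp only [List.mem_map]
  constructor
  · rintro ⟨c, hc, h⟩
    by_cases hd : PySem.Chars.isdigit c
    · exact ⟨c, hc, hd⟩
    · simp [hd] at h
  · rintro ⟨c, hc, hd⟩
    exact ⟨c, hc, by simp [hd]⟩

theorem nodigit_mem (l : List Char) :
    ("nodigit" ∈ l.map (fun c => if PySem.Chars.isdigit c then "digit" else "nodigit"))
    ↔ l.countP PySem.Chars.isdigit < l.length := by
  rw [List.countP_lt_length_iff]
  simp only [List.mem_map]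
  constructor
  · rintro ⟨c, hc, h⟩
    by_cases hd : PySem.Chars.isdigit c
    · simp [hd] at h
    · exact ⟨c, hc, by simp [hd]⟩
  · rintro ⟨c, hc, hd⟩
    exact ⟨c, hc, by simp [hd]⟩

-- ===== VERDICT (by name: the statement is the Claim_ definition above) =====
theorem has_digits_spec : Claim_equal_has_digits := by
  intro a _
  unfold Spec_has_digits has_digits has_digits_alt
  simp only [labels_foldl, List.reverse_nil, List.nil_append, count_foldl, Int.zero_add]
  have hlen : PySem.Str.len a = (a.toList.length : Int) := by
    simp [PySem.Str.len]
  rw [hlen]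
  simp only [List.map_cons, List.map_nil, List.all_cons, List.all_nil, id,
    Bool.and_true, Bool.and_eq_true, decide_eq_true_iff, digit_mem, nodigit_mem]
  by_cases hP : 0 < a.toList.countP PySem.Chars.isdigit ∧
      a.toList.countP PySem.Chars.isdigit < a.toList.length
  · rw [if_pos hP, if_pos ⟨by exact_mod_cast hP.1, by exact_mod_cast hP.2⟩]
  · rw [if_neg hP, if_neg (by
      rintro ⟨h1, h2⟩
      exact hP ⟨by exact_mod_cast h1, by exact_mod_cast h2⟩)]
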